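-- pv_equiv track=rewrite | github.com/jeanhaley32/terminal-slideshow | slideshow.py | _extract_ascii_art
-- ===== SOURCE A (Python) =====
-- def _extract_ascii_art(content):
--     """Extract the ASCII art diagram from slide content."""
--     lines = content.split('\n')
--     art_lines = []
--     in_code_block = False
--
--     for line in lines:
--         if line.strip().startswith('```'):
--             in_code_block = not in_code_block
--             continue
--         if in_code_block:
--             art_lines.append(line)
--
--     return '\n'.join(art_lines) if art_lines else content
-- ===== SOURCE B (Python) =====
-- def _extract_ascii_art(content):
--     """Extract the ASCII art diagram from slide content."""
--     lines = iter(content.split('\n'))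
--     art_lines = []
--     for line in lines:
--         if line.strip().startswith('```'):
--             for inner in lines:
--                 if inner.strip().startswith('```'):
--                     break
--                 art_lines.append(inner)
--     return '\n'.join(art_lines) if art_lines else content
-- ===== Notes on version B (the rewrite author's own statement) =====
-- stated objective: alternative
-- what changed: Replaces the single-pass boolean-toggle loop by a nested block scan over one shared iterator: the outer loop skips to each opening fence, the inner loop consumes the block's lines up to the closing fence (or end of input), so no in_code_block flag is maintained.
import Mathlib
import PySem

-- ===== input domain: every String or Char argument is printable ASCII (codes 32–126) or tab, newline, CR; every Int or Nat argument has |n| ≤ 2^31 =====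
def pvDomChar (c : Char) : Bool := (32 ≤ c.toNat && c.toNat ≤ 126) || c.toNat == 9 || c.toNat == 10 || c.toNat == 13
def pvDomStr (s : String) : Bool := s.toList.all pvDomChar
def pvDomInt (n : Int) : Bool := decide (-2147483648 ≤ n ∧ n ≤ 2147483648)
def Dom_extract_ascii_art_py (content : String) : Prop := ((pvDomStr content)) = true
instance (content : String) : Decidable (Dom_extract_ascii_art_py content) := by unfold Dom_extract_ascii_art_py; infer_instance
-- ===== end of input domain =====

-- B replaces A's single-pass boolean-toggle loop by a nested block scan (outer loop finds an
-- opening fence, inner loop consumes the block); same results, objective: alternative.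

-- ===== PORT A =====
-- line.strip().startswith('```')  (shared helper: both Pythons use this same test)
def pvIsFence (l : String) : Bool := PySem.Str.startswith (PySem.Str.strip l) "```"

-- content.split('\n'); the separator is the nonempty literal "\n", so split? is always `some`
def pvLines (content : String) : List String := (PySem.Str.split? content "\n").getD []

def extract_ascii_art_py (content : String) : String :=
  let lines := pvLines content
  let st := lines.foldl (fun (st : List String × Bool) line =>
      if pvIsFence line then (st.1, !st.2)
      else if st.2 then (st.1 ++ [line], st.2)
      else st) ([], false)
  if st.1.isEmpty then content else PySem.Str.join "\n" st.1

-- ===== PORT B =====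
-- inner loop: consume lines of one block up to (and including) the closing fence;
-- returns (block's art lines, remaining lines after the closing fence)
def pvCollectBlock : List String → List String × List String
  | [] => ([], [])
  | l :: ls =>
    if pvIsFence l then ([], ls)
    else
      let p := pvCollectBlock ls
      (l :: p.1, p.2)

theorem pvCollectBlock_snd_le (ls : List String) : (pvCollectBlock ls).2.length ≤ ls.length := by
  induction ls with
  | nil => simp [pvCollectBlock]
  | cons l ls ih =>
    simp only [pvCollectBlock]
    split <;> simp <;> omega

-- outer loop: skip to each opening fence, then hand over to pvCollectBlock
def pvCollectAll : List String → List String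
  | [] => []
  | l :: ls =>
    if pvIsFence l then
      let p := pvCollectBlock ls
      p.1 ++ pvCollectAll p.2
    else pvCollectAll ls
termination_by ls => ls.length
decreasing_by
  · exact Nat.lt_succ_of_le (pvCollectBlock_snd_le ls)
  · simp

def extract_ascii_art_py_alt (content : String) : String :=
  let art := pvCollectAll (pvLines content)
  if art.isEmpty then content else PySem.Str.join "\n" art

-- ===== PRECONDITION & SPEC =====
def Spec_extract_ascii_art_py (content : String) (out : String) : Prop := out = extract_ascii_art_py_alt content
instance (content : String) (out : String) : Decidable (Spec_extract_ascii_art_py content out) := by unfold Spec_extract_ascii_art_py; infer_instance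

-- ===== CLAIM (what is proved, stated in full; the proofs are below) =====
def Claim_equal_extract_ascii_art_py : Prop := ∀ (content : String), Dom_extract_ascii_art_py content → Spec_extract_ascii_art_py content (extract_ascii_art_py content)

-- ===== LEMMAS AND PROOFS =====

-- A's loop, recast as structural recursion on the remaining lines with the toggle flag
def pvAux : List String → Bool → List String
  | [], _ => []
  | l :: ls, flag =>
    if pvIsFence l then pvAux ls (!flag)
    else if flag then l :: pvAux ls flag
    else pvAux ls flag

theorem pvFoldl_eq_aux (ls : List String) (acc : List String) (flag : Bool) :
    (ls.foldl (fun (st : List String × Bool) line =>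
      if pvIsFence line then (st.1, !st.2)
      else if st.2 then (st.1 ++ [line], st.2)
      else st) (acc, flag)).1 = acc ++ pvAux ls flag := by
  induction ls generalizing acc flag with
  | nil => simp [pvAux]
  | cons l ls ih =>
    simp only [List.foldl_cons, pvAux]
    by_cases hf : pvIsFence l
    · simp [hf, ih]
    · by_cases hb : flag <;> simp [hf, hb, ih]

theorem pvAux_eq_collect (ls : List String) :
    pvAux ls false = pvCollectAll ls ∧
    pvAux ls true = (pvCollectBlock ls).1 ++ pvCollectAll (pvCollectBlock ls).2 := by
  induction ls with
  | nil => simp [pvAux, pvCollectAll, pvCollectBlock]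
  | cons l ls ih =>
    by_cases hf : pvIsFence l
    · constructor
      · rw [pvCollectAll]
        simp [pvAux, hf, ih.2]
      · rw [pvCollectBlock]
        simp [pvAux, hf, ih.1]
    · constructor
      · rw [pvCollectAll]
        simp [pvAux, hf, ih.1]
      · rw [pvCollectBlock]
        simp [pvAux, hf, ih.2]

-- ===== VERDICT (by name: the statement is the Claim_ definition above) =====
theorem extract_ascii_art_py_spec : Claim_equal_extract_ascii_art_py := by
  intro content _
  unfold Spec_extract_ascii_art_py extract_ascii_art_py extract_ascii_art_py_alt
  simp only []
  rw [pvFoldl_eq_aux, (pvAux_eq_collect _).1]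
  simp
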